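-- pv_equiv track=rewrite | github.com/papibe/advent-of-code-2025 | python/day06/part1.py | solve
-- ===== SOURCE A (Python) =====
-- def solve(numbers, operations) -> int:
--     grand_total: int = 0
--
--     for index, op in enumerate(operations):
--         if op == "*":
--             result = 1
--         else:
--             result = 0
--
--         for row in numbers:
--             if op == "*":
--                 result *= row[index]
--             else:
--                 result += row[index]
--
--         grand_total += result
--
--
--     return grand_total
-- ===== SOURCE B (Python) =====
-- def solve(numbers, operations) -> int:
--     star = [i for i, op in enumerate(operations) if op == "*"]
--     plus = [i for i, op in enumerate(operations) if op != "*"]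
--     total = sum(row[i] for row in numbers for i in plus)
--     for i in star:
--         product = 1
--         for row in numbers:
--             product *= row[i]
--         total += product
--     return total
-- ===== Notes on version B (the rewrite author's own statement) =====
-- stated objective: alternative
-- what changed: B first partitions the column indices by operator, then computes all '+'-columns at once as a single flat sum over every selected matrix entry (no per-column accumulator, justified by commutativity of addition) and only the '*'-columns as individual products, instead of A's uniform per-operation column fold.
import Mathlib
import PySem

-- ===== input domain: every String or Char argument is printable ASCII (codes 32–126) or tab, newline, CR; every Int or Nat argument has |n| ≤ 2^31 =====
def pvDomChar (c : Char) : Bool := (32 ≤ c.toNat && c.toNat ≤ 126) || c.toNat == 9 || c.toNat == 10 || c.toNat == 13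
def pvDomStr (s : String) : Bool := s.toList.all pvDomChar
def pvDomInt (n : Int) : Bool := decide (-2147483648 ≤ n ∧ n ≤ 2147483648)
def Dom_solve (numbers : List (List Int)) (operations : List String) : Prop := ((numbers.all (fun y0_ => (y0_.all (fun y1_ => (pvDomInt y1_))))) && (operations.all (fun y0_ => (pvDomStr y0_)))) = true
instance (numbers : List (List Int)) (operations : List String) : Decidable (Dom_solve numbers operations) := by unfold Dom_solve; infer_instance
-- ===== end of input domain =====

-- B partitions the indices by operator and collapses all '+'-columns into one flat sum
-- (only '*'-columns keep a per-column pass); alternative algorithm, same cost.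

-- ===== PORT A =====
-- Literal port of A: for each (index, op) in enumerate(operations), fold the rows
-- with row[index] (PySem.List.pyGet?; the out-of-range case, where Python raises
-- IndexError, is excluded by Pre_solve below, so the .getD 0 default is never used).
def solve (numbers : List (List Int)) (operations : List String) : Int :=
  (PySem.List.enumerate operations).foldl
    (fun grand_total iop =>
      let result0 : Int := if iop.2 == "*" then 1 else 0
      let result := numbers.foldl
        (fun r row =>
          if iop.2 == "*" then r * (PySem.List.pyGet? row iop.1).getD 0
          else r + (PySem.List.pyGet? row iop.1).getD 0) result0
      grand_total + result) 0

-- ===== PORT B =====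
-- Literal port of B: split indices into star/plus, one flat sum for all plus entries,
-- then a loop over the star indices adding each column's product.
def solve_alt (numbers : List (List Int)) (operations : List String) : Int :=
  let star := ((PySem.List.enumerate operations).filter (fun p => p.2 == "*")).map (fun p => p.1)
  let plus := ((PySem.List.enumerate operations).filter (fun p => !(p.2 == "*"))).map (fun p => p.1)
  let total := (numbers.flatMap (fun row => plus.map (fun i => (PySem.List.pyGet? row i).getD 0))).sum
  star.foldl
    (fun total i =>
      total + numbers.foldl (fun product row => product * (PySem.List.pyGet? row i).getD 0) 1)
    total

-- ===== PRECONDITION & SPEC =====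
-- Pre_ excludes exactly the inputs where Python A (and Python B) raise IndexError:
-- some row shorter than operations.
def Pre_solve (numbers : List (List Int)) (operations : List String) : Prop :=
  ∀ row ∈ numbers, operations.length ≤ row.length
instance (numbers : List (List Int)) (operations : List String) : Decidable (Pre_solve numbers operations) := by unfold Pre_solve; infer_instance

def pvWitness_solve : List (List Int) × List String := ([[1, 2], [3, 4]], ["*", "+"])

def Spec_solve (numbers : List (List Int)) (operations : List String) (out : Int) : Prop := out = solve_alt numbers operations
instance (numbers : List (List Int)) (operations : List String) (out : Int) : Decidable (Spec_solve numbers operations out) := by unfold Spec_solve; infer_instance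

-- ===== CLAIM (what is proved, stated in full; the proofs are below) =====
def Claim_equal_solve : Prop := ∀ (numbers : List (List Int)) (operations : List String), Dom_solve numbers operations → Pre_solve numbers operations → Spec_solve numbers operations (solve numbers operations)

-- ===== LEMMAS AND PROOFS =====

-- entry of a row at column i, as both ports read it
def ent (row : List Int) (i : Int) : Int := (PySem.List.pyGet? row i).getD 0

-- column sum and column product
def colSum (numbers : List (List Int)) (i : Int) : Int := (numbers.map (fun row => ent row i)).sum
def colProd (numbers : List (List Int)) (i : Int) : Int :=
  numbers.foldl (fun p row => p * ent row i) 1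

-- A's inner additive fold is the column sum
theorem inner_add (numbers : List (List Int)) (i : Int) :
    numbers.foldl (fun r row => r + ent row i) 0 = colSum numbers i := by
  rw [PySem.List.foldl_add]; simp [colSum]

-- A as a sum over the enumerated operations
theorem solve_eq_sum (numbers : List (List Int)) (operations : List String) :
    solve numbers operations
      = ((PySem.List.enumerate operations).map
          (fun p => if p.2 == "*" then colProd numbers p.1 else colSum numbers p.1)).sum := by
  unfold solve
  rw [PySem.List.foldl_add]
  simp only [zero_add]
  refine congrArg List.sum (List.map_congr_left (fun p _ => ?_))
  by_cases h : p.2 == "*"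
  · simp [h, colProd, ent]
  · simp [h, ← inner_add, ent]

-- splitting a sum over a list by a predicate
theorem sum_split {α : Type} (l : List α) (q : α → Bool) (f : α → Int) :
    (l.map f).sum
      = ((l.filter q).map f).sum + ((l.filter (fun x => !q x)).map f).sum := by
  induction l with
  | nil => simp
  | cons x xs ih =>
    simp only [List.map_cons, List.sum_cons, List.filter_cons, ih]
    by_cases h : q x <;> simp [h] <;> ring

-- exchanging the two summations of B's flat '+' pass
theorem sum_swap_flat (numbers : List (List Int)) (plus : List Int) :
    (numbers.flatMap (fun row => plus.map (fun i => ent row i))).sum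
      = (plus.map (fun i => colSum numbers i)).sum := by
  induction numbers with
  | nil => simp [colSum]
  | cons r rest ih =>
    simp only [List.flatMap_cons, List.sum_append, ih]
    rw [← PySem.List.sum_map_add_int]
    simp [colSum]

theorem solve_spec_core (numbers : List (List Int)) (operations : List String) :
    solve numbers operations = solve_alt numbers operations := by
  rw [solve_eq_sum]
  unfold solve_alt
  rw [PySem.List.foldl_add]
  have hswap := sum_swap_flat numbers
      (((PySem.List.enumerate operations).filter (fun p => !(p.2 == "*"))).map (fun p => p.1))
  simp only [ent] at hswap
  rw [hswap, sum_split (PySem.List.enumerate operations) (fun p => p.2 == "*")]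
  rw [add_comm]
  congr 1
  · rw [List.map_map]
    refine congrArg List.sum (List.map_congr_left (fun p hp => ?_))
    have h : ¬ (p.2 == "*") := by
      have := (List.mem_filter.1 hp).2; simpa using this
    simp [h, Function.comp, colSum, ent]
  · rw [List.map_map]
    refine congrArg List.sum (List.map_congr_left (fun p hp => ?_))
    have h : p.2 == "*" := (List.mem_filter.1 hp).2
    simp [h, Function.comp, colProd, ent]

-- ===== VERDICT (by name: the statement is the Claim_ definition above) =====
theorem solve_spec : Claim_equal_solve := by
  intro numbers operations _ _
  exact solve_spec_core numbers operations
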